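-- pv_equiv track=rewrite | github.com/paiml/depyler | examples/hard_pathological_dict4.py | count_matching_keys
-- ===== SOURCE A (Python) =====
-- def count_matching_keys(d1: dict[str, int], d2: dict[str, int], keys_to_check: list[str]) -> int:
--     """Count how many keys have the same value in both dicts."""
--     matches: int = 0
--     i: int = 0
--     while i < len(keys_to_check):
--         k: str = keys_to_check[i]
--         if k in d1 and k in d2:
--             if d1[k] == d2[k]:
--                 matches = matches + 1
--         i = i + 1
--     return matches
-- ===== SOURCE B (Python) =====
-- def count_matching_keys(d1: dict[str, int], d2: dict[str, int], keys_to_check: list[str]) -> int: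
--     """Count how many keys have the same value in both dicts."""
--     counts: dict[str, int] = {}
--     for k in keys_to_check:
--         counts[k] = counts.get(k, 0) + 1
--     matches: int = 0
--     for k, c in counts.items():
--         if k in d1 and k in d2 and d1[k] == d2[k]:
--             matches += c
--     return matches
-- ===== Notes on version B (the rewrite author's own statement) =====
-- stated objective: alternative
-- what changed: Replaces the per-occurrence index-driven while loop (two membership tests + comparison for every element of keys_to_check) by a multiplicity aggregation: first build an occurrence-count dict of keys_to_check, then test each DISTINCT key once against the two dicts and add its multiplicity.
import Mathlib
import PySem

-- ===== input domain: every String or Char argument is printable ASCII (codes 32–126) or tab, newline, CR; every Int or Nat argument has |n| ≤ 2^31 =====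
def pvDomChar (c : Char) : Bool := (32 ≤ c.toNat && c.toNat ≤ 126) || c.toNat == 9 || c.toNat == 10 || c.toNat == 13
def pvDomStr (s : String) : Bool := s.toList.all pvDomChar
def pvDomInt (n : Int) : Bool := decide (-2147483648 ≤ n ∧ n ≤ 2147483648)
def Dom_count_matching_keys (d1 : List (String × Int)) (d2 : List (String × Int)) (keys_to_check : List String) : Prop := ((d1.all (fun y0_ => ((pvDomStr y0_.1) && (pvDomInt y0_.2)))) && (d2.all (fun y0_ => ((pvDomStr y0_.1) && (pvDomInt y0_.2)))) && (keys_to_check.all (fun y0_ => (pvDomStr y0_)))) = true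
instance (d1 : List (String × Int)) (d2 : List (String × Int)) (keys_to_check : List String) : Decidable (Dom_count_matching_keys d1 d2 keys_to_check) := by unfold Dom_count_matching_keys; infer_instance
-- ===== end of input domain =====

-- B replaces A's per-occurrence while loop (two dict probes + comparison for every element of
-- keys_to_check) by multiplicity aggregation: build an occurrence-count dict of keys_to_check,
-- then test each DISTINCT key once and add its count (alternative decomposition, same cost class).

-- ===== PORT A =====
-- one iteration of A's while-loop body, on the key already fetched
def cmkStepA (d1 : List (String × Int)) (d2 : List (String × Int)) (mtchs : Int) (k : String) : Int :=
  if (PySem.Dict.mk d1).contains k && (PySem.Dict.mk d2).contains k then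
    (if (PySem.Dict.mk d1).getD k 0 == (PySem.Dict.mk d2).getD k 0 then mtchs + 1 else mtchs)
  else mtchs

def count_matching_keys (d1 : List (String × Int)) (d2 : List (String × Int)) (keys_to_check : List String) : Int :=
  (PySem.List.pyRange 0 (PySem.List.len keys_to_check) 1).foldl
    (fun mtchs i => cmkStepA d1 d2 mtchs (PySem.List.pyGetD keys_to_check i ""))
    0

-- ===== PORT B =====
def count_matching_keys_alt (d1 : List (String × Int)) (d2 : List (String × Int)) (keys_to_check : List String) : Int :=
  -- counts[k] = counts.get(k, 0) + 1, for k in keys_to_check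
  let counts : PySem.Dict String Int :=
    keys_to_check.foldl (fun d k => d.insert k (d.getD k 0 + 1)) PySem.Dict.empty
  -- for k, c in counts.items(): if k in d1 and k in d2 and d1[k] == d2[k]: matches += c
  counts.items.foldl
    (fun mtchs p =>
      if (PySem.Dict.mk d1).contains p.1 && (PySem.Dict.mk d2).contains p.1 &&
         ((PySem.Dict.mk d1).getD p.1 0 == (PySem.Dict.mk d2).getD p.1 0)
      then mtchs + p.2 else mtchs)
    0

-- ===== PRECONDITION & SPEC =====
def Spec_count_matching_keys (d1 : List (String × Int)) (d2 : List (String × Int)) (keys_to_check : List String) (out : Int) : Prop := out = count_matching_keys_alt d1 d2 keys_to_check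
instance (d1 : List (String × Int)) (d2 : List (String × Int)) (keys_to_check : List String) (out : Int) : Decidable (Spec_count_matching_keys d1 d2 keys_to_check out) := by unfold Spec_count_matching_keys; infer_instance

-- ===== CLAIM =====
def Claim_equal_count_matching_keys : Prop := ∀ (d1 : List (String × Int)) (d2 : List (String × Int)) (keys_to_check : List String), Dom_count_matching_keys d1 d2 keys_to_check → Spec_count_matching_keys d1 d2 keys_to_check (count_matching_keys d1 d2 keys_to_check)

-- ===== LEMMAS AND PROOFS =====

-- the common per-key test
def cmkP (d1 : List (String × Int)) (d2 : List (String × Int)) (k : String) : Bool :=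
  (PySem.Dict.mk d1).contains k && (PySem.Dict.mk d2).contains k &&
    ((PySem.Dict.mk d1).getD k 0 == (PySem.Dict.mk d2).getD k 0)

theorem cmkStepA_eq (d1 : List (String × Int)) (d2 : List (String × Int)) (acc : Int) (k : String) :
    cmkStepA d1 d2 acc k = (if cmkP d1 d2 k then acc + 1 else acc) := by
  unfold cmkStepA cmkP
  cases ((PySem.Dict.mk d1).contains k && (PySem.Dict.mk d2).contains k) <;>
    cases ((PySem.Dict.mk d1).getD k 0 == (PySem.Dict.mk d2).getD k 0) <;> simp

-- A counts the occurrences of keys satisfying the test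
theorem cmkA_eq_countP (d1 : List (String × Int)) (d2 : List (String × Int))
    (keys : List String) :
    count_matching_keys d1 d2 keys = (keys.countP (cmkP d1 d2) : Int) := by
  unfold count_matching_keys
  have h := PySem.List.foldl_pyRange_pyGetD (a := 0) (xs := keys) (f := cmkStepA d1 d2)
    (d := "") (init := (0 : Int)) (le_refl 0)
  simp only [Int.toNat_zero, List.drop_zero] at h
  rw [h]
  have h2 : keys.foldl (cmkStepA d1 d2) 0
      = keys.foldl (fun acc k => if cmkP d1 d2 k then acc + 1 else acc) 0 := by
    apply PySem.List.foldl_congr_mem'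
    intro k _ acc
    exact cmkStepA_eq d1 d2 acc k
  rw [h2, PySem.List.foldl_if_add_one]
  simp

-- a fold adding p.2 when the test holds is init + sum of the selected values
theorem foldl_if_add_snd (q : String → Bool) (l : List (String × Int)) (init : Int) :
    l.foldl (fun m p => if q p.1 then m + p.2 else m) init
      = init + (l.map (fun p => if q p.1 then p.2 else 0)).sum := by
  induction l generalizing init with
  | nil => simp
  | cons x t ih =>
      simp only [List.foldl_cons, List.map_cons, List.sum_cons, ih]
      by_cases h : q x.1 = true
      · simp [h]
        ring
      · simp [h]

-- summing an indicator spike over a Nodup list containing x gives the value once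
theorem sum_map_spike (x : String) (c : Int) :
    ∀ (D : List String), D.Nodup → x ∈ D →
      (D.map (fun k => if k = x then c else 0)).sum = c := by
  intro D
  induction D with
  | nil => intro _ hx; cases hx
  | cons a t ih =>
      intro hnd hx
      simp only [List.map_cons, List.sum_cons]
      rcases List.mem_cons.mp hx with h | h
      · subst h
        have hz : ∀ k ∈ t, (if k = x then c else 0) = 0 := by
          intro k hk
          have hne : k ≠ x := fun e => (List.nodup_cons.mp hnd).1 (e ▸ hk)
          simp [hne]
        rw [List.map_congr_left hz]
        simp
      · have hne : a ≠ x := fun e => (List.nodup_cons.mp hnd).1 (e ▸ h)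
        rw [ih (List.nodup_cons.mp hnd).2 h]
        simp [hne]

-- key lemma: summing (count in xs) over a Nodup superset of xs, filtered by p, counts xs by p
theorem sum_map_count_eq_countP (p : String → Bool) (xs : List String) :
    ∀ (D : List String), D.Nodup → (∀ k, k ∈ xs → k ∈ D) →
      (D.map (fun k => if p k then (xs.count k : Int) else 0)).sum = (xs.countP p : Int) := by
  induction xs with
  | nil => intro D _ _; simp
  | cons x t ih =>
      intro D hnd hsub
      have hx : x ∈ D := hsub x List.mem_cons_self
      have hsub' : ∀ k, k ∈ t → k ∈ D := fun k hk => hsub k (List.mem_cons_of_mem _ hk)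
      have hpt : ∀ k ∈ D,
          (if p k then ((x :: t).count k : Int) else 0)
            = (if p k then (t.count k : Int) else 0)
              + (if k = x then (if p x then 1 else 0) else 0) := by
        intro k _
        by_cases hk : k = x
        · subst hk
          rw [List.count_cons_self]
          by_cases hp : p k = true
          · simp only [hp, if_true]
            push_cast
            ring
          · simp [hp]
        · have hcnt : (x :: t).count k = t.count k :=
            List.count_cons_of_ne (Ne.symm hk)
          rw [hcnt]
          simp [hk]
      rw [List.map_congr_left hpt, PySem.List.sum_map_add_int, ih D hnd hsub',
        sum_map_spike x _ D hnd hx, List.countP_cons]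
      push_cast
      ring

-- ===== VERDICT =====
theorem count_matching_keys_spec : Claim_equal_count_matching_keys := by
  intro d1 d2 keys _
  unfold Spec_count_matching_keys
  simp only [count_matching_keys_alt, PySem.Dict.foldl_insert_getD_add_one_eq_counter,
    PySem.Dict.items_counter]
  rw [cmkA_eq_countP]
  rw [show (fun (mtchs : Int) (p : String × Int) =>
        if ((PySem.Dict.mk d1).contains p.1 && (PySem.Dict.mk d2).contains p.1 &&
           ((PySem.Dict.mk d1).getD p.1 0 == (PySem.Dict.mk d2).getD p.1 0))
        then mtchs + p.2 else mtchs)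
      = (fun m p => if cmkP d1 d2 p.1 then m + p.2 else m) from rfl]
  rw [foldl_if_add_snd (cmkP d1 d2)]
  rw [List.map_map]
  have : ((fun p : String × Int => if cmkP d1 d2 p.1 then p.2 else 0) ∘
      (fun k => (k, (keys.count k : Int))))
      = fun k => if cmkP d1 d2 k then (keys.count k : Int) else 0 := rfl
  rw [this, sum_map_count_eq_countP (cmkP d1 d2) keys (PySem.Set.ofList keys)
    (PySem.Set.nodup_ofList keys) (fun k hk => (PySem.Set.mem_ofList keys k).mpr hk)]
  simp
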